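-- pv_equiv track=rewrite | github.com/dominysouzapersonal-commits/invest | backend/app/services/analysis_engine.py | _is_br_ticker
-- ===== SOURCE A (Python) =====
-- def _is_br_ticker(ticker: str) -> bool:
--     """Detect BR B3 tickers: 4 letters + 1-2 digits (PETR4, VALE3, HGLG11, SANB11)."""
--     if len(ticker) < 5 or len(ticker) > 6:
--         return False
--     for split_at in (4, 3):
--         letters = ticker[:split_at]
--         digits = ticker[split_at:]
--         if letters.isalpha() and digits.isdigit():
--             return True
--     return False
-- ===== SOURCE B (Python) =====
-- def _is_br_ticker(ticker: str) -> bool: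
--     """Detect BR B3 tickers: 4 letters + 1-2 digits (PETR4, VALE3, HGLG11, SANB11)."""
--     if len(ticker) not in (5, 6):
--         return False
--     i = 0
--     while i < len(ticker) and ticker[i].isalpha():
--         i += 1
--     return ticker[i:].isdigit() and i in (3, 4)
-- ===== Notes on version B (the rewrite author's own statement) =====
-- stated objective: simpler
-- what changed: Instead of trying the two candidate split points (4, then 3) and re-testing prefix/suffix at each, B scans once from the front to find the letter/digit boundary i and checks that the suffix is all digits and i is 3 or 4.
import Mathlib
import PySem

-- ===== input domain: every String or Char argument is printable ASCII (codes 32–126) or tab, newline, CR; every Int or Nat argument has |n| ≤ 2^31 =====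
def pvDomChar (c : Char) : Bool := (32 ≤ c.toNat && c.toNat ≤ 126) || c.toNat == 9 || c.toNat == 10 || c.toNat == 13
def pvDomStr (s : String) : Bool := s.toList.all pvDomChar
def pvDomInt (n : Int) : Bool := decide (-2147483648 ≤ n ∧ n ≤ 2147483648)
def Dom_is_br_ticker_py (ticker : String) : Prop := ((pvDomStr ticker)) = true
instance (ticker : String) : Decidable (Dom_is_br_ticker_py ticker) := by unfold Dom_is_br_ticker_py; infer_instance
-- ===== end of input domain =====

-- B replaces A's two trial splits (at 4, then 3) by a single forward scan that finds the
-- letter/digit boundary once; objective: simpler (one pass, no candidate loop).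

-- ===== PORT A =====
-- literal transliteration of _is_br_ticker: length guard, then `for split_at in (4, 3)`
-- returning True on the first split whose prefix isalpha and suffix isdigit
def is_br_ticker_py (ticker : String) : Bool :=
  if PySem.Str.len ticker < 5 || PySem.Str.len ticker > 6 then false
  else
    [(4 : Int), 3].any (fun split_at =>
      let letters := PySem.Str.slice ticker none (some split_at)
      let digits  := PySem.Str.slice ticker (some split_at) none
      PySem.Str.strIsalpha letters && PySem.Str.strIsdigit digits)

-- ===== PORT B =====
-- `i = 0; while i < len(ticker) and ticker[i].isalpha(): i += 1` — the forward scan,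
-- ported as structural recursion over the character list
def pvLeadAlpha : List Char → Nat
  | [] => 0
  | c :: cs => if PySem.Chars.isalpha c then pvLeadAlpha cs + 1 else 0

def is_br_ticker_py_alt (ticker : String) : Bool :=
  if PySem.Str.len ticker == 5 || PySem.Str.len ticker == 6 then
    let i := pvLeadAlpha ticker.toList
    PySem.Str.strIsdigit (PySem.Str.slice ticker (some (i : Int)) none) && (i == 3 || i == 4)
  else false

-- ===== PRECONDITION & SPEC =====
def Spec_is_br_ticker_py (ticker : String) (out : Bool) : Prop := out = is_br_ticker_py_alt ticker
instance (ticker : String) (out : Bool) : Decidable (Spec_is_br_ticker_py ticker out) := by unfold Spec_is_br_ticker_py; infer_instance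

-- ===== CLAIM (what is proved, stated in full; the proofs are below) =====
def Claim_equal_is_br_ticker_py : Prop := ∀ (ticker : String), Dom_is_br_ticker_py ticker → Spec_is_br_ticker_py ticker (is_br_ticker_py ticker)

-- ===== LEMMAS AND PROOFS =====

-- a Python character cannot satisfy both isalpha and isdigit
theorem pv_alpha_not_digit (c : Char) (h : PySem.Chars.isalpha c = true) :
    PySem.Chars.isdigit c = false := by
  simp only [PySem.Chars.isalpha, PySem.Chars.isupper, PySem.Chars.islower, PySem.Chars.isdigit,
    Bool.or_eq_true, Bool.and_eq_true, decide_eq_true_eq, Bool.and_eq_false_iff,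
    decide_eq_false_iff_not, not_le, Char.le_def, UInt32.le_iff_toNat_le,
    show ('0':Char).val.toNat = 48 from rfl, show ('9':Char).val.toNat = 57 from rfl,
    show ('A':Char).val.toNat = 65 from rfl, show ('Z':Char).val.toNat = 90 from rfl,
    show ('a':Char).val.toNat = 97 from rfl, show ('z':Char).val.toNat = 122 from rfl] at h ⊢
  omega


theorem pvMain (cs : List Char) :
    (if (decide ((cs.length : Int) < 5) || decide ((cs.length : Int) > 6)) = true then false
      else
        [(4 : Int), 3].any fun split_at =>
          PySem.Chars.strIsalpha (PySem.Chars.slice cs none (some split_at)) &&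
            PySem.Chars.strIsdigit (PySem.Chars.slice cs (some split_at))) =
      (if ((cs.length : Int) == 5 || (cs.length : Int) == 6) = true then
        PySem.Chars.strIsdigit (PySem.Chars.slice cs (some (pvLeadAlpha cs : Int))) &&
          (pvLeadAlpha cs == 3 || pvLeadAlpha cs == 4)
      else false) := by
  rcases cs with _ | ⟨a, _ | ⟨b, _ | ⟨c, _ | ⟨d, _ | ⟨e, _ | ⟨f, rest⟩⟩⟩⟩⟩⟩ <;>
    simp [PySem.Chars.slice, PySem.List.slice, PySem.List.clampIdx,
      PySem.Chars.strIsalpha, PySem.Chars.strIsdigit, pvLeadAlpha]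
  · -- length 5
    cases h1 : PySem.Chars.isalpha a <;> cases h2 : PySem.Chars.isalpha b <;>
      cases h3 : PySem.Chars.isalpha c <;> cases h4 : PySem.Chars.isalpha d <;>
      cases h5 : PySem.Chars.isalpha e <;>
      simp_all [pv_alpha_not_digit]
  · -- length 6 or more
    rcases rest with _ | ⟨g, rest2⟩
    · cases h1 : PySem.Chars.isalpha a <;> cases h2 : PySem.Chars.isalpha b <;>
        cases h3 : PySem.Chars.isalpha c <;> cases h4 : PySem.Chars.isalpha d <;>
        cases h5 : PySem.Chars.isalpha e <;> cases h6 : PySem.Chars.isalpha f <;>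
        simp_all [pv_alpha_not_digit]
    · have h1 : (6 : Int) ≤ (rest2.length : Int) + 1 + 1 + 1 + 1 + 1 + 1 := by omega
      have h5 : ¬((rest2.length : Int) + 1 + 1 + 1 + 1 + 1 + 1 + 1 = 5) := by omega
      have h6 : ¬((rest2.length : Int) + 1 + 1 + 1 + 1 + 1 + 1 + 1 = 6) := by omega
      simp [h1, h5, h6]

-- ===== VERDICT (by name: the statement is the Claim_ definition above) =====
theorem is_br_ticker_py_spec : Claim_equal_is_br_ticker_py := by
  intro ticker _
  unfold Spec_is_br_ticker_py is_br_ticker_py is_br_ticker_py_alt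
  simp only [PySem.Str.len, PySem.Str.strIsalpha, PySem.Str.strIsdigit, PySem.Str.slice,
    String.toList_ofList]
  exact pvMain ticker.toList
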